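-- pv_equiv track=rewrite | github.com/k4pran/AdventOfCode | 2024/day23/p2.py | find_clique
-- ===== SOURCE A (Python) =====
-- from collections import defaultdict, deque
--
-- def find_clique(graph, start):
--     stack = deque([start])
--     visited = set()
--     visited.add(start)
--
--     while stack:
--         node = stack.pop()
--
--         for adj in graph.get(node, []):
--             if adj not in visited:
--                 if all(adj in graph[n] for n in visited):
--                     stack.append(adj)
--                     visited.add(adj)
--
--     return visited
-- ===== SOURCE B (Python) =====
-- def find_clique(graph, start):
--     # Greedy clique growth tracking the candidate pool: `pool` is the set of
--     # nodes adjacent to every current clique member, so A's per-candidate scan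
--     # over the whole clique collapses to one membership test; the pool is
--     # intersected with the new member's neighbourhood on each addition.
--     clique = {start}
--     pool = set(graph.get(start, []))
--     agenda = [start]
--     while agenda:
--         node = agenda.pop()
--         for adj in graph.get(node, []):
--             if adj in pool and adj not in clique:
--                 clique.add(adj)
--                 pool &= set(graph[adj])
--                 agenda.append(adj)
--     return clique
-- ===== Notes on version B (the rewrite author's own statement) =====
-- stated objective: alternative
-- what changed: A's per-candidate scan all(adj in graph[n] for n in visited) is replaced by a maintained candidate pool = intersection of the neighbourhoods of all clique members (shrunk with pool &= set(graph[adj]) on each addition), so qualification is a single membership test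
-- outside the precondition, e.g. on find_clique({'': ['b']}, ''): A returns {'', 'b'}, B raises KeyError; on find_clique({'a': ['b', 'x'], 'b': ['a']}, 'a'): A returns {'a', 'b'}, B returns {'a', 'b'}
import Mathlib
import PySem

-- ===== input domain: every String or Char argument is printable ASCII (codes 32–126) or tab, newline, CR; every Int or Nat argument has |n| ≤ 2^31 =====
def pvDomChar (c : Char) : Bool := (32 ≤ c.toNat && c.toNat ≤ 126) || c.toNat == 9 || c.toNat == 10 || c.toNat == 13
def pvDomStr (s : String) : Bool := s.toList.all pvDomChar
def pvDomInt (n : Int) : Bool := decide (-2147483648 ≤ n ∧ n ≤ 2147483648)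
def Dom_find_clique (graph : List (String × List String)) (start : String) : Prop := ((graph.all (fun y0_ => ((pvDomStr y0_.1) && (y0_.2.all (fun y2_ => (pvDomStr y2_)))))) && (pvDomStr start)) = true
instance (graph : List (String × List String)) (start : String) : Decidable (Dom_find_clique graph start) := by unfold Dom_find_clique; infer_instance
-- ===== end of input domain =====

-- B replaces A's per-candidate scan over the whole clique by a maintained candidate
-- pool (the intersection of the neighbourhoods of all clique members), shrunk on each
-- addition (objective: alternative; same traversal order, same resulting set).

-- ===== PORT A =====
-- fuel for the while loop: 1 + total adjacency length bounds the number of pops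
-- (each pop beyond the first is matched by a push, and each push adds a distinct
-- adjacency element to visited).
def pvFuel (graph : List (String × List String)) : Nat :=
  graph.foldl (fun n p => n + p.2.length) 0 + 1

-- body of the `for adj in graph.get(node, [])` loop; state = (stack, visited)
def pvStepA (graph : List (String × List String)) :
    List String × PySem.Set String → String → List String × PySem.Set String
  | (stack, visited), adj =>
    if PySem.Set.contains visited adj then (stack, visited)
    else if visited.all (fun n => (PySem.Dict.getD (PySem.Dict.mk graph) n []).contains adj) then
      -- `graph[n]` ported as getD: exact under Pre_ (every n ∈ visited is then a key)
      (adj :: stack, PySem.Set.add visited adj)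
    else (stack, visited)

-- the while loop; stack head = Python's stack right end (pop/append site)
def pvLoopA (graph : List (String × List String)) :
    Nat → List String → PySem.Set String → List String
  | 0, _, visited => visited
  | fuel+1, stack, visited =>
    match stack with
    | [] => visited
    | node :: rest =>
      let st := (PySem.Dict.getD (PySem.Dict.mk graph) node []).foldl (pvStepA graph) (rest, visited)
      pvLoopA graph fuel st.1 st.2

def find_clique (graph : List (String × List String)) (start : String) : List String :=
  pvLoopA graph (pvFuel graph) [start] (PySem.Set.add PySem.Set.empty start)

-- ===== PORT B =====
def pvNbrs (graph : List (String × List String)) (v : String) : List String :=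
  PySem.Dict.getD (PySem.Dict.mk graph) v []

structure PvState where
  agenda : List String
  clique : PySem.Set String
  pool   : PySem.Set String
deriving Repr

-- `for adj in graph.get(node, [])` of Source B, as structural recursion on the list
def pvScan (graph : List (String × List String)) : List String → PvState → PvState
  | [], st => st
  | adj :: more, st =>
    pvScan graph more <|
      if PySem.Set.contains st.pool adj && !(PySem.Set.contains st.clique adj) then
        { agenda := adj :: st.agenda
          clique := PySem.Set.add st.clique adj
          -- `pool &= set(graph[adj])`; graph[adj] ported as getD (inside pvNbrs):
          -- exact under Pre_, where every pool member is a key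
          pool   := PySem.Set.inter st.pool (pvNbrs graph adj) }
      else st

-- 1 + total adjacency length, the same bound on the number of pops as in A
def pvBudget (graph : List (String × List String)) : Nat :=
  (graph.map (fun p => p.2.length)).sum + 1

def pvRun (graph : List (String × List String)) : Nat → PvState → List String
  | 0, st => st.clique
  | fuel+1, st =>
    match st.agenda with
    | [] => st.clique
    | node :: rest =>
      pvRun graph fuel (pvScan graph (pvNbrs graph node) { st with agenda := rest })

def find_clique_alt (graph : List (String × List String)) (start : String) : List String :=
  pvRun graph (pvBudget graph)
    { agenda := [start]
      clique := PySem.Set.add PySem.Set.empty start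
      pool   := PySem.Set.ofList (pvNbrs graph start) }

-- ===== PRECONDITION & SPEC =====
-- Pre_ excludes graphs whose start adjacency list mentions a node that is not a key:
-- since start stays in visited, only members of graph[start] can join the clique, so a
-- KeyError in A's graph[n] lookup requires such a node; on those inputs A may raise
-- (depending on set iteration order) or return, so they are excluded; it slightly
-- over-excludes, since on some such graphs the missing node never joins and A returns.
def Pre_find_clique (graph : List (String × List String)) (start : String) : Prop :=
  ((PySem.Dict.getD (PySem.Dict.mk graph) start []).all
    (fun a => (PySem.Dict.mk graph).contains a)) = true
instance (graph : List (String × List String)) (start : String) : Decidable (Pre_find_clique graph start) := by unfold Pre_find_clique; infer_instance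

def pvWitness_find_clique : (List (String × List String)) × String :=
  ([("a", ["b", "c"]), ("b", ["a", "c"]), ("c", ["a", "b"])], "a")

def Spec_find_clique (graph : List (String × List String)) (start : String) (out : List String) : Prop := out = find_clique_alt graph start
instance (graph : List (String × List String)) (start : String) (out : List String) : Decidable (Spec_find_clique graph start out) := by unfold Spec_find_clique; infer_instance

-- ===== CLAIM (what is proved, stated in full; the proofs are below) =====
def Claim_equal_find_clique : Prop := ∀ (graph : List (String × List String)) (start : String), Dom_find_clique graph start → Pre_find_clique graph start → Spec_find_clique graph start (find_clique graph start)

-- ===== LEMMAS AND PROOFS =====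

-- the pool invariant: pool holds exactly the nodes adjacent to every clique member
def pvInv (graph : List (String × List String))
    (clique pool : PySem.Set String) : Prop :=
  ∀ x, x ∈ pool ↔ ∀ n ∈ clique, x ∈ PySem.Dict.getD (PySem.Dict.mk graph) n []

lemma pvInv_inter (graph : List (String × List String))
    (clique pool : PySem.Set String) (adj : String)
    (h : pvInv graph clique pool) :
    pvInv graph (clique ++ [adj]) (PySem.Set.inter pool (pvNbrs graph adj)) := by
  intro x
  simp only [PySem.Set.mem_inter, pvNbrs, List.mem_append, List.mem_singleton, h x]
  constructor
  · rintro ⟨h1, h2⟩ n (hn | rfl)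
    · exact h1 n hn
    · exact h2
  · intro hall
    exact ⟨fun n hn => hall n (Or.inl hn), hall adj (Or.inr rfl)⟩

-- scanning one adjacency list: pvScan follows A's foldl and keeps the invariant
lemma pvScan_rel (graph : List (String × List String)) (l : List String) :
    ∀ (stk : List String) (vis pool : PySem.Set String), pvInv graph vis pool →
      (pvScan graph l ⟨stk, vis, pool⟩).agenda = (l.foldl (pvStepA graph) (stk, vis)).1 ∧
      (pvScan graph l ⟨stk, vis, pool⟩).clique = (l.foldl (pvStepA graph) (stk, vis)).2 ∧
      pvInv graph (l.foldl (pvStepA graph) (stk, vis)).2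
        (pvScan graph l ⟨stk, vis, pool⟩).pool := by
  induction l with
  | nil => intro stk vis pool h; exact ⟨rfl, rfl, h⟩
  | cons a t ih =>
    intro stk vis pool h
    by_cases hv : a ∈ vis
    · have hA : pvStepA graph (stk, vis) a = (stk, vis) := by simp [pvStepA, hv]
      have hB : pvScan graph (a :: t) ⟨stk, vis, pool⟩ = pvScan graph t ⟨stk, vis, pool⟩ := by
        simp [pvScan, hv]
      rw [List.foldl_cons, hA, hB]
      exact ih stk vis pool h
    · by_cases hq : ∀ n ∈ vis, a ∈ PySem.Dict.getD (PySem.Dict.mk graph) n []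
      · have hp : a ∈ pool := (h a).2 hq
        have hA : pvStepA graph (stk, vis) a = (a :: stk, vis ++ [a]) := by
          simp [pvStepA, hv]
          exact fun x hx => hq x hx
        have hB : pvScan graph (a :: t) ⟨stk, vis, pool⟩ =
            pvScan graph t ⟨a :: stk, vis ++ [a], PySem.Set.inter pool (pvNbrs graph a)⟩ := by
          simp only [pvScan]
          rw [PySem.Set.add_of_not_mem hv]
          simp [hv, hp]
        rw [List.foldl_cons, hA, hB]
        exact ih _ _ _ (pvInv_inter graph vis pool a h)
      · have hp : a ∉ pool := fun hmem => hq ((h a).1 hmem)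
        have hA : pvStepA graph (stk, vis) a = (stk, vis) := by simp [pvStepA, hv, hq]
        have hB : pvScan graph (a :: t) ⟨stk, vis, pool⟩ = pvScan graph t ⟨stk, vis, pool⟩ := by
          simp [pvScan, hp]
        rw [List.foldl_cons, hA, hB]
        exact ih stk vis pool h

-- the two loops agree for every fuel value, given the invariant
lemma pvRun_eq (graph : List (String × List String)) :
    ∀ (fuel : Nat) (stack : List String) (vis pool : PySem.Set String),
      pvInv graph vis pool →
      pvRun graph fuel ⟨stack, vis, pool⟩ = pvLoopA graph fuel stack vis := by
  intro fuel
  induction fuel with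
  | zero => intro stack vis pool _; rfl
  | succ n ih =>
    intro stack vis pool h
    cases stack with
    | nil => rfl
    | cons node rest =>
      simp only [pvRun, pvLoopA]
      obtain ⟨h1, h2, h3⟩ := pvScan_rel graph
        (PySem.Dict.getD (PySem.Dict.mk graph) node []) rest vis pool h
      have hn : pvNbrs graph node = PySem.Dict.getD (PySem.Dict.mk graph) node [] := rfl
      rcases hB : pvScan graph (PySem.Dict.getD (PySem.Dict.mk graph) node [])
          ⟨rest, vis, pool⟩ with ⟨b1, b2, b3⟩
      rw [hB] at h1 h2 h3
      simp only at h1 h2 h3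
      rw [hn, hB, h1, h2]
      exact ih _ _ _ h3

-- B's fuel expression equals A's
lemma pv_sum_foldl (l : List (String × List String)) :
    ∀ n : Nat, n + (l.map (fun p => p.2.length)).sum = l.foldl (fun n p => n + p.2.length) n := by
  induction l with
  | nil => intro n; simp
  | cons a t ih => intro n; simp [← ih, Nat.add_assoc]

lemma pvBudget_eq (graph : List (String × List String)) : pvBudget graph = pvFuel graph := by
  unfold pvBudget pvFuel
  congr 1
  simpa using pv_sum_foldl graph 0

-- the initial states satisfy the invariant
lemma pvInv_init (graph : List (String × List String)) (start : String) :
    pvInv graph (PySem.Set.add PySem.Set.empty start)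
      (PySem.Set.ofList (pvNbrs graph start)) := by
  have hs : PySem.Set.add PySem.Set.empty start = [start] := rfl
  rw [hs]
  intro x
  simp [PySem.Set.mem_ofList, pvNbrs]

-- ===== VERDICT (by name: the statement is the Claim_ definition above) =====
theorem find_clique_spec : Claim_equal_find_clique := by
  intro graph start _ _
  unfold Spec_find_clique find_clique find_clique_alt
  rw [pvBudget_eq]
  symm
  exact pvRun_eq graph (pvFuel graph) [start] _ _ (pvInv_init graph start)
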